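-- pv_equiv track=rewrite | github.com/ingridjackeline/tst-lp1 | tst/exercicios/exercicio52/disciplinas_professor.py | disciplinas
-- ===== SOURCE A (Python) =====
-- def disciplinas(alocacao, professor):
-- 	lista_disciplinas = []
-- 	num_creditos = 0
-- 	alocada = False
--
-- 	for chave in alocacao:
-- 		for nome in alocacao[chave]:
-- 			if nome == professor:
-- 				if alocada == False:
-- 					lista_disciplinas.append(chave[0])
-- 					alocada = True
-- 				num_creditos += chave[1]
--
-- 		if alocada == True:
-- 			alocada = False
--
-- 	return (lista_disciplinas, num_creditos)
-- ===== SOURCE B (Python) =====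
-- def disciplinas(alocacao, professor):
--     lista = [chave[0] for chave in alocacao if professor in alocacao[chave]]
--     creditos = sum(chave[1] * alocacao[chave].count(professor) for chave in alocacao)
--     return (lista, creditos)
-- ===== Notes on version B (the rewrite author's own statement) =====
-- stated objective: simpler
-- what changed: Replaces the single nested loop with a stateful 'alocada' flag by two independent passes: a comprehension collecting the discipline names whose professor list contains the professor, and a sum of credits*count(professor) over all entries.
import Mathlib
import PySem

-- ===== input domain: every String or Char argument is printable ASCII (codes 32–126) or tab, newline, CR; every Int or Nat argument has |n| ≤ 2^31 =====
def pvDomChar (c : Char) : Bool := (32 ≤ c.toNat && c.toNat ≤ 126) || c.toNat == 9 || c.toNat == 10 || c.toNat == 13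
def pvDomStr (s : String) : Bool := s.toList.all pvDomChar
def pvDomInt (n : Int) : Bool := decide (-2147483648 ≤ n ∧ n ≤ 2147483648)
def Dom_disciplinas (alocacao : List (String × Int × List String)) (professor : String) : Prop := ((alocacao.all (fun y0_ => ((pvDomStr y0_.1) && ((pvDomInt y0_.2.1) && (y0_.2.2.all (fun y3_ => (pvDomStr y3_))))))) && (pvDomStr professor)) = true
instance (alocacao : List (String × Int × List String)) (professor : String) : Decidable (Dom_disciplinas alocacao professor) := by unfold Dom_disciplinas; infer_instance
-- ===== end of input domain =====

-- B replaces A's single nested loop with a stateful flag by two independent passes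
-- (a filter/map for the discipline list and a sum of credits*count); objective: simpler.

-- ===== PORT A =====
-- loop bodies as named helpers; state: (lista_disciplinas, num_creditos, alocada)
def dInner (p nm : String) (cr : Int) (st : List String × Int × Bool) (nome : String) : List String × Int × Bool :=
  if nome == p then
    let st1 := if st.2.2 == false then (st.1 ++ [nm], st.2.1, true) else st
    (st1.1, st1.2.1 + cr, st1.2.2)
  else st

def dOuter (p : String) (st : List String × Int × Bool) (chave : String × Int × List String) : List String × Int × Bool :=
  let st2 := chave.2.2.foldl (dInner p chave.1 chave.2.1) st
  if st2.2.2 == true then (st2.1, st2.2.1, false) else st2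

def disciplinas (alocacao : List (String × Int × List String)) (professor : String) : List String × Int :=
  let st := alocacao.foldl (dOuter professor) ([], 0, false)
  (st.1, st.2.1)

-- ===== PORT B =====
def disciplinas_alt (alocacao : List (String × Int × List String)) (professor : String) : List String × Int :=
  ((alocacao.filter (fun chave => chave.2.2.contains professor)).map (fun chave => chave.1),
   (alocacao.map (fun chave => chave.2.1 * (chave.2.2.count professor : Int))).sum)

-- ===== PRECONDITION & SPEC =====
def Spec_disciplinas (alocacao : List (String × Int × List String)) (professor : String) (out : List String × Int) : Prop := out = disciplinas_alt alocacao professor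
instance (alocacao : List (String × Int × List String)) (professor : String) (out : List String × Int) : Decidable (Spec_disciplinas alocacao professor out) := by unfold Spec_disciplinas; infer_instance

-- ===== CLAIM (what is proved, stated in full; the proofs are below) =====
def Claim_equal_disciplinas : Prop := ∀ (alocacao : List (String × Int × List String)) (professor : String), Dom_disciplinas alocacao professor → Spec_disciplinas alocacao professor (disciplinas alocacao professor)

-- ===== LEMMAS AND PROOFS =====

-- A's inner loop over one key's professor list, from an arbitrary state
theorem dInner_foldl (p nm : String) (cr : Int) (xs : List String) :
    ∀ (L : List String) (c : Int) (b : Bool),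
    xs.foldl (dInner p nm cr) (L, c, b)
      = (L ++ (if b || xs.contains p then if b then [] else [nm] else []),
         c + cr * (xs.count p : Int),
         b || xs.contains p) := by
  induction xs with
  | nil => intro L c b; simp
  | cons x xs ih =>
    intro L c b
    simp only [List.foldl_cons]
    by_cases hx : x = p
    · subst hx
      cases b with
      | false =>
        rw [show dInner x nm cr (L, c, false) x = (L ++ [nm], c + cr, true) from by
          simp [dInner]]
        rw [ih (L ++ [nm]) (c + cr) true]
        simp [List.count_cons_self]
        ring
      | true =>
        rw [show dInner x nm cr (L, c, true) x = (L, c + cr, true) from by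
          simp [dInner]]
        rw [ih L (c + cr) true]
        simp [List.count_cons_self]
        ring
    · have hb : (x == p) = false := beq_eq_false_iff_ne.mpr hx
      have hb2 : (p == x) = false := beq_eq_false_iff_ne.mpr (fun h => hx h.symm)
      rw [show dInner p nm cr (L, c, b) x = (L, c, b) from by simp [dInner, hb]]
      rw [ih L c b]
      have hc : (x :: xs).contains p = xs.contains p := by
        simp only [List.contains_cons, hb2, Bool.false_or]
      have hcnt : (x :: xs).count p = xs.count p := by
        simp [List.count_cons, hb]
      rw [hc, hcnt]

-- one step of A's outer loop from a state with alocada = false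
theorem dOuter_eq (p : String) (k : String × Int × List String) (L : List String) (c : Int) :
    dOuter p (L, c, false) k
      = (L ++ (if k.2.2.contains p then [k.1] else []),
         c + k.2.1 * (k.2.2.count p : Int), false) := by
  unfold dOuter
  rw [dInner_foldl p k.1 k.2.1 k.2.2 L c false]
  cases hk : k.2.2.contains p <;> simp

-- the outer loop: starting from (L, c, false), the final state carries B's two answers
theorem dOuter_foldl (p : String) (alocacao : List (String × Int × List String)) :
    ∀ (L : List String) (c : Int),
    alocacao.foldl (dOuter p) (L, c, false)
      = (L ++ (alocacao.filter (fun chave => chave.2.2.contains p)).map (fun chave => chave.1),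
         c + (alocacao.map (fun chave => chave.2.1 * (chave.2.2.count p : Int))).sum,
         false) := by
  induction alocacao with
  | nil => intro L c; simp
  | cons k ks ih =>
    intro L c
    rw [List.foldl_cons, dOuter_eq, ih]
    by_cases hk : p ∈ k.2.2
    · have hkc : k.2.2.contains p = true := by simpa using hk
      simp [hk, List.append_assoc, add_assoc]
    · have hkc : k.2.2.contains p = false := by simpa using hk
      simp [hk, add_assoc]

-- ===== VERDICT (by name: the statement is the Claim_ definition above) =====
theorem disciplinas_spec : Claim_equal_disciplinas := by
  intro alocacao professor _
  unfold Spec_disciplinas disciplinas disciplinas_alt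
  rw [dOuter_foldl professor alocacao [] 0]
  simp
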